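-- pv_equiv track=rewrite | github.com/yennanliu/CS_basics | leetcode_python/Math/projection-area-of-3d-shapes.py | projectionArea
-- ===== SOURCE A (Python) =====
-- def projectionArea(grid):
--     """
--     :type grid: List[List[int]]
--     :rtype: int
--     """
--     result = 0
--     for i in range(len(grid)):
--         max_row, max_col = 0, 0
--         for j in range(len(grid)):
--             if grid[i][j]:
--                 result += 1
--             max_row = max(max_row, grid[i][j])
--             max_col = max(max_col, grid[j][i])
--         result += max_row + max_col
--     return result
-- ===== SOURCE B (Python) =====
-- def projectionArea(grid):
--     """
--     :type grid: List[List[int]]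
--     :rtype: int
--     """
--     def go(rows, colmax):
--         if not rows:
--             return sum(colmax)
--         cells = list(zip(colmax, rows[0]))
--         vals = [v for _, v in cells]
--         return (sum(1 for v in vals if v)
--                 + max(0, *vals)
--                 + go(rows[1:], [max(c, v) for c, v in cells]))
--     return go(grid, [0] * len(grid))
-- ===== Notes on version B (the rewrite author's own statement) =====
-- stated objective: alternative
-- what changed: Replaces A's index-based double loop, which recomputes each column's maximum by a full inner scan of grid[j][i] inside every outer iteration, with a structural recursion over the rows that threads a running column-maxima vector (zip/max per row) and adds each row's nonzero count and maximum as it goes, summing the column vector at the end; Pre_ excludes only grids with a row shorter than len(grid), on which A raises IndexError.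
import Mathlib
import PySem

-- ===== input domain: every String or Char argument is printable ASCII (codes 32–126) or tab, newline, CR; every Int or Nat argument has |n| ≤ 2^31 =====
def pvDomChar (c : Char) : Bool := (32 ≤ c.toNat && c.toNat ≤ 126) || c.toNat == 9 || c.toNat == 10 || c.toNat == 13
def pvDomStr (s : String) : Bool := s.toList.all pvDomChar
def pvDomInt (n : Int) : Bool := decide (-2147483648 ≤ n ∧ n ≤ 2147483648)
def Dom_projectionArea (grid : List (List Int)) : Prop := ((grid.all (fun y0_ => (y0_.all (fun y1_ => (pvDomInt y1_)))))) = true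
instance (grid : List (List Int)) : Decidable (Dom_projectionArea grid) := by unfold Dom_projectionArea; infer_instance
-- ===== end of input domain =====

-- B replaces A's index-based double loop (which rescans column j inside every outer
-- iteration) by a structural recursion over the rows that threads a running
-- column-maxima vector, adding each row's nonzero count and maximum as it goes;
-- objective: alternative (same cost, different traversal and state).

-- ===== PORT A =====
def projectionArea (grid : List (List Int)) : Int :=
  let n : Int := PySem.List.len grid
  (PySem.List.pyRange 0 n 1).foldl (fun result i =>
    let s := (PySem.List.pyRange 0 n 1).foldl
      (fun (st : Int × Int × Int) j =>
        ((if PySem.List.pyGetD (PySem.List.pyGetD grid i []) j 0 ≠ 0 then st.1 + 1 else st.1),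
         max st.2.1 (PySem.List.pyGetD (PySem.List.pyGetD grid i []) j 0),
         max st.2.2 (PySem.List.pyGetD (PySem.List.pyGetD grid j []) i 0)))
      (result, 0, 0)
    s.1 + (s.2.1 + s.2.2)) 0

-- ===== PORT B =====
-- recursive helper 'go(rows, colmax)' of Source B, transcribed step for step
def pvGo (rows : List (List Int)) (colmax : List Int) : Int :=
  match rows with
  | [] => colmax.sum
  | row :: rest =>
      let cells := colmax.zip row
      let vals := cells.map (fun p => p.2)
      ((vals.countP (fun v => v ≠ 0) : Nat) : Int)
        + vals.foldl max 0
        + pvGo rest (cells.map (fun p => max p.1 p.2))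

def projectionArea_alt (grid : List (List Int)) : Int :=
  pvGo grid (List.replicate grid.length 0)

-- ===== PRECONDITION & SPEC =====
-- Pre_ excludes exactly the grids on which A raises IndexError: some row shorter than len(grid).
def Pre_projectionArea (grid : List (List Int)) : Prop :=
  ∀ row ∈ grid, grid.length ≤ row.length
instance (grid : List (List Int)) : Decidable (Pre_projectionArea grid) := by
  unfold Pre_projectionArea; infer_instance
def pvWitness_projectionArea : List (List Int) := [[2, 0], [-1, 4]]

def Spec_projectionArea (grid : List (List Int)) (out : Int) : Prop := out = projectionArea_alt grid
instance (grid : List (List Int)) (out : Int) : Decidable (Spec_projectionArea grid out) := by unfold Spec_projectionArea; infer_instance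

-- ===== CLAIM (what is proved, stated in full; the proofs are below) =====
def Claim_equal_projectionArea : Prop := ∀ (grid : List (List Int)), Dom_projectionArea grid → Pre_projectionArea grid → Spec_projectionArea grid (projectionArea grid)

-- ===== LEMMAS AND PROOFS =====

-- indexing grid[i][j] for j in range(n) reads exactly the n-prefix of the row
lemma pv_map_pyRange_take (row : List Int) (n : Nat) (h : n ≤ row.length) (d : Int) :
    (PySem.List.pyRange 0 (n : Int) 1).map (fun j => PySem.List.pyGetD row j d) = row.take n := by
  induction n with
  | zero => simp [PySem.List.pyRange]
  | succ m ih =>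
      have hm : m < row.length := by omega
      rw [show ((m + 1 : Nat) : Int) = (m : Int) + 1 by push_cast; ring,
        PySem.List.pyRange_one_succ_right (by positivity),
        List.map_append, ih (by omega), List.take_add_one,
        List.getElem?_eq_getElem hm]
      simp [PySem.List.pyGetD_natCast, List.getD_eq_getElem?_getD,
        List.getElem?_eq_getElem hm]

-- A's inner loop: three independent accumulators are three loops
lemma pv_innerA (grid : List (List Int)) (i result : Int) :
    (PySem.List.pyRange 0 (grid.length : Int) 1).foldl
      (fun (st : Int × Int × Int) j =>
        ((if PySem.List.pyGetD (PySem.List.pyGetD grid i []) j 0 ≠ 0 then st.1 + 1 else st.1),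
         max st.2.1 (PySem.List.pyGetD (PySem.List.pyGetD grid i []) j 0),
         max st.2.2 (PySem.List.pyGetD (PySem.List.pyGetD grid j []) i 0)))
      (result, 0, 0)
    = (result + ((PySem.List.pyRange 0 (grid.length : Int) 1).countP
          (fun j => decide (PySem.List.pyGetD (PySem.List.pyGetD grid i []) j 0 ≠ 0)) : Int),
       (PySem.List.pyRange 0 (grid.length : Int) 1).foldl
         (fun m j => max m (PySem.List.pyGetD (PySem.List.pyGetD grid i []) j 0)) 0,
       (PySem.List.pyRange 0 (grid.length : Int) 1).foldl
         (fun m j => max m (PySem.List.pyGetD (PySem.List.pyGetD grid j []) i 0)) 0) := by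
  rw [PySem.List.foldl_prod_mk
        (f := fun r j => if PySem.List.pyGetD (PySem.List.pyGetD grid i []) j 0 ≠ 0 then r + 1 else r)
        (g := fun (p : Int × Int) j =>
          (max p.1 (PySem.List.pyGetD (PySem.List.pyGetD grid i []) j 0),
           max p.2 (PySem.List.pyGetD (PySem.List.pyGetD grid j []) i 0))),
      PySem.List.foldl_prod_mk
        (f := fun m j => max m (PySem.List.pyGetD (PySem.List.pyGetD grid i []) j 0))
        (g := fun m j => max m (PySem.List.pyGetD (PySem.List.pyGetD grid j []) i 0)),
      PySem.List.foldl_ite_add_one]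

-- a loop accumulating three summands is three sums
lemma pv_foldl_three (l : List Int) (c m1 m2 : Int → Int) (a : Int) :
    l.foldl (fun r i => (r + c i) + (m1 i + m2 i)) a
      = a + ((l.map c).sum + ((l.map m1).sum + (l.map m2).sum)) := by
  rw [PySem.List.foldl_congr_mem l (fun r i => (r + c i) + (m1 i + m2 i))
        (fun r i => r + (c i + (m1 i + m2 i))) a (by intro acc x _; ring),
      PySem.List.foldl_add]
  simp only [PySem.List.sum_map_add_int]

-- a per-row computation indexed by 'for i in range(len(grid))' is a map over the rows
lemma pv_map_rows {α : Type} (grid : List α) (d : α) (H : α → Int) :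
    (PySem.List.pyRange 0 (grid.length : Int)).map (fun i => H (PySem.List.pyGetD grid i d))
      = grid.map H := by
  rw [show (fun i => H (PySem.List.pyGetD grid i d))
        = H ∘ (fun i => PySem.List.pyGetD grid i d) from rfl,
    ← List.map_map, PySem.List.map_pyGetD_pyRange_zero']

-- zip with a shorter-or-equal first list projects to a prefix of the second
lemma pv_map_snd_zip {α β : Type} (l1 : List α) (l2 : List β) :
    (l1.zip l2).map (fun p => p.2) = l2.take l1.length := by
  induction l1 generalizing l2 with
  | nil => simp
  | cons a t ih =>
      cases l2 with
      | nil => simp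
      | cons b t2 => simp [ih]

-- reading a list as the map of its getD over range of its length
lemma pv_self_as_range_map (l : List Int) :
    l = (List.range l.length).map (fun i => l.getD i 0) := by
  apply List.ext_getElem
  · simp
  · intro i h1 h2
    simp [List.getD_eq_getElem?_getD, List.getElem?_eq_getElem h1]

-- closed form of B's recursion: per-row contributions plus final column maxima
lemma pvGo_spec (rows : List (List Int)) (cm : List Int)
    (h : ∀ row ∈ rows, cm.length ≤ row.length) :
    pvGo rows cm
      = (rows.map (fun row =>
            (((row.take cm.length).countP (fun v => decide (v ≠ 0)) : Nat) : Int)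
              + (row.take cm.length).foldl max 0)).sum
        + ((List.range cm.length).map (fun i =>
            rows.foldl (fun m row => max m (row.getD i 0)) (cm.getD i 0))).sum := by
  induction rows generalizing cm with
  | nil =>
      simp only [pvGo, List.map_nil, List.sum_nil, List.foldl_nil, zero_add]
      exact pv_self_as_range_map cm ▸ rfl
  | cons r rest ih =>
      have hr : cm.length ≤ r.length := h r (List.mem_cons_self)
      have hlen : ((cm.zip r).map (fun p => max p.1 p.2)).length = cm.length := by
        simp [List.length_zip]; omega
      have hrest : ∀ row ∈ rest, ((cm.zip r).map (fun p => max p.1 p.2)).length ≤ row.length := by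
        intro row hm; rw [hlen]; exact h row (List.mem_cons_of_mem _ hm)
      have hgetD : ∀ i ∈ List.range cm.length,
          ((cm.zip r).map (fun p => max p.1 p.2)).getD i 0
            = max (cm.getD i 0) (r.getD i 0) := by
        intro i hi
        rw [List.mem_range] at hi
        have hi2 : i < (cm.zip r).length := by simp [List.length_zip]; omega
        have hir : i < r.length := by omega
        rw [List.getD_eq_getElem?_getD, List.getElem?_map,
          List.getElem?_eq_getElem hi2]
        simp [List.getElem_zip, List.getD_eq_getElem?_getD,
          List.getElem?_eq_getElem hi, List.getElem?_eq_getElem hir]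
      simp only [pvGo, pv_map_snd_zip, ih _ hrest, hlen, List.map_cons, List.sum_cons,
        List.foldl_cons]
      have hmap : (List.range cm.length).map (fun i =>
            List.foldl (fun m row => max m (row.getD i 0))
              (((cm.zip r).map (fun p => max p.1 p.2)).getD i 0) rest)
          = (List.range cm.length).map (fun i =>
            List.foldl (fun m row => max m (row.getD i 0))
              (max (cm.getD i 0) (r.getD i 0)) rest) :=
        List.map_congr_left (fun i hi => by rw [hgetD i hi])
      rw [hmap]
      ring

-- B's final column pass written over pyRange, as A reads it
lemma pv_side_glue (grid : List (List Int)) :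
    ((List.range grid.length).map (fun i =>
        grid.foldl (fun m row => max m (row.getD i 0))
          ((List.replicate grid.length (0 : Int)).getD i 0))).sum
      = ((PySem.List.pyRange 0 (grid.length : Int) 1).map (fun j =>
          grid.foldl (fun m row => max m (PySem.List.pyGetD row j 0)) 0)).sum := by
  rw [PySem.List.pyRange_one]
  simp only [sub_zero, Int.toNat_natCast, List.map_map]
  apply congrArg
  apply List.map_congr_left
  intro k hk
  rw [List.mem_range] at hk
  have hrep : (List.replicate grid.length (0 : Int)).getD k 0 = 0 := by
    rw [List.getD_eq_getElem?_getD, List.getElem?_replicate]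
    simp [hk]
  simp only [Function.comp, zero_add, hrep, PySem.List.pyGetD_natCast]

theorem projectionArea_spec : Claim_equal_projectionArea := by
  intro grid _ hpre
  show projectionArea grid = projectionArea_alt grid
  unfold projectionArea projectionArea_alt
  simp only [PySem.List.len_eq, pv_innerA, pv_foldl_three]
  rw [pv_map_rows grid ([] : List Int)
        (fun row => ((List.countP (fun j => decide (PySem.List.pyGetD row j 0 ≠ 0))
          (PySem.List.pyRange 0 (grid.length : Int)) : Nat) : Int)),
      pv_map_rows grid ([] : List Int)
        (fun row => List.foldl (fun m j => max m (PySem.List.pyGetD row j 0)) 0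
          (PySem.List.pyRange 0 (grid.length : Int)))]
  have h_top : List.map
      (fun row => ((List.countP (fun j => decide (PySem.List.pyGetD row j 0 ≠ 0))
        (PySem.List.pyRange 0 (grid.length : Int)) : Nat) : Int)) grid
      = List.map (fun row => ((List.countP (fun v => decide (v ≠ 0)) (List.take grid.length row) : Nat) : Int)) grid :=
    List.map_congr_left (fun row hrow => by
      rw [← pv_map_pyRange_take row grid.length (hpre row hrow) 0, List.countP_map]; rfl)
  have h_front : List.map
      (fun row => List.foldl (fun m j => max m (PySem.List.pyGetD row j 0)) 0
        (PySem.List.pyRange 0 (grid.length : Int))) grid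
      = List.map (fun row => List.foldl max 0 (List.take grid.length row)) grid :=
    List.map_congr_left (fun row hrow => by
      rw [← pv_map_pyRange_take row grid.length (hpre row hrow) 0, List.foldl_map]; try rfl)
  have h_side : List.map
      (fun i => List.foldl (fun m j => max m (PySem.List.pyGetD (PySem.List.pyGetD grid j []) i 0)) 0
        (PySem.List.pyRange 0 (grid.length : Int)))
      (PySem.List.pyRange 0 (grid.length : Int))
      = List.map (fun j => List.foldl (fun m row => max m (PySem.List.pyGetD row j 0)) 0 grid)
          (PySem.List.pyRange 0 (grid.length : Int)) :=
    List.map_congr_left (fun i _ =>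
      PySem.List.foldl_pyRange_zero_pyGetD' grid []
        (fun m row => max m (PySem.List.pyGetD row i 0)) 0)
  rw [h_top, h_front, h_side, pvGo_spec grid (List.replicate grid.length 0)
        (by intro row hrow; simpa using hpre row hrow)]
  simp only [List.length_replicate, pv_side_glue]
  simp only [PySem.List.sum_map_add_int]
  ring
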